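-- pv_equiv track=rewrite | github.com/Sergey140146659/Smart-Manual | src/ml/searching/request_answer.py | unite_articles
-- ===== SOURCE A (Python) =====
-- def unite_articles(articles_tf, articles_bm):
--     '''
--     Эта функция объединяет результаты поиска по законам с помощью методов BM25 и TF-IDF
--     для определения наиболее релевантных законов по запросу.
--     Если два метода поиска вернули одинаковые законы, то они не будут дублироваться в итоговом списке.
--     '''
--     articles_togetger = []
--     for a, b in zip(articles_bm, articles_tf):
--         if a != b:
--             if a not in articles_togetger:
--                 articles_togetger.append(a)
--             if b not in articles_togetger:
--                 articles_togetger.append(b)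
--         else:
--             if a not in articles_togetger:
--                 articles_togetger.append(a)
--     return articles_togetger[0: min(len(articles_togetger), 5)]
-- ===== SOURCE B (Python) =====
-- def unite_articles(articles_tf, articles_bm):
--     # Simpler decomposition: interleave the two ranked lists, then a single
--     # first-occurrence dedup pass, then keep the first 5.
--     interleaved = []
--     for a, b in zip(articles_bm, articles_tf):
--         interleaved.append(a)
--         interleaved.append(b)
--     result = []
--     for x in interleaved:
--         if x not in result:
--             result.append(x)
--     return result[:5]
-- ===== Notes on version B (the rewrite author's own statement) =====
-- stated objective: simpler
-- what changed: B splits A's single loop with branching conditional appends into two plain passes: build the interleaved list from zip, then one uniform first-occurrence dedup pass (dropping A's redundant a!=b branch), then take the first 5 with [:5].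
import Mathlib
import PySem

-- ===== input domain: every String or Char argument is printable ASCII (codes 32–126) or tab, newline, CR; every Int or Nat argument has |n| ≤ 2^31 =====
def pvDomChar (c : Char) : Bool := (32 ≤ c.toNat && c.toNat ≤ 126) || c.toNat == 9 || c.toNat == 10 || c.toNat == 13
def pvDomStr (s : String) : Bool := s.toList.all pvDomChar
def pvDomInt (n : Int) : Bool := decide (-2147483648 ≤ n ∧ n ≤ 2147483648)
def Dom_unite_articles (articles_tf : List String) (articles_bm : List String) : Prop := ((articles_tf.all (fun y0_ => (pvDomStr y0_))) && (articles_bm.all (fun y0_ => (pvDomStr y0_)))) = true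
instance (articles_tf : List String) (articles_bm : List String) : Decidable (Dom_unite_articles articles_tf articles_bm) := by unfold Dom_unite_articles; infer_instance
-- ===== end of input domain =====

-- B replaces A's single branching loop by two plain passes (interleave, then one
-- uniform first-occurrence dedup) followed by [:5]; objective: simpler.

-- ===== PORT A =====
-- the loop 'for a, b in zip(articles_bm, articles_tf): …' of A, state = articles_togetger
def uniteLoopA (acc : List String) : List (String × String) → List String
  | [] => acc
  | (a, b) :: rest =>
    if a ≠ b then
      let acc1 := if a ∈ acc then acc else acc ++ [a]
      let acc2 := if b ∈ acc1 then acc1 else acc1 ++ [b]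
      uniteLoopA acc2 rest
    else
      uniteLoopA (if a ∈ acc then acc else acc ++ [a]) rest

def unite_articles (articles_tf : List String) (articles_bm : List String) : List String :=
  let articles_togetger := uniteLoopA [] (articles_bm.zip articles_tf)
  PySem.List.slice articles_togetger (some 0) (some (min (articles_togetger.length : Int) 5))

-- ===== PORT B =====
def unite_articles_alt (articles_tf : List String) (articles_bm : List String) : List String :=
  let interleaved := (articles_bm.zip articles_tf).foldl (fun acc p => acc ++ [p.1, p.2]) []
  let result := interleaved.foldl (fun acc x => if x ∈ acc then acc else acc ++ [x]) []
  PySem.List.slice result none (some 5)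

-- ===== PRECONDITION & SPEC =====
def Spec_unite_articles (articles_tf : List String) (articles_bm : List String) (out : List String) : Prop := out = unite_articles_alt articles_tf articles_bm
instance (articles_tf : List String) (articles_bm : List String) (out : List String) : Decidable (Spec_unite_articles articles_tf articles_bm out) := by unfold Spec_unite_articles; infer_instance

-- ===== CLAIM (what is proved, stated in full; the proofs are below) =====
def Claim_equal_unite_articles : Prop := ∀ (articles_tf : List String) (articles_bm : List String), Dom_unite_articles articles_tf articles_bm → Spec_unite_articles articles_tf articles_bm (unite_articles articles_tf articles_bm)

-- ===== LEMMAS AND PROOFS =====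

-- A's loop equals the dedup fold over the interleaved (flatMap) list
theorem uniteLoopA_eq_dedup (l : List (String × String)) :
    ∀ acc, uniteLoopA acc l
      = (l.flatMap fun p => [p.1, p.2]).foldl (fun acc x => if x ∈ acc then acc else acc ++ [x]) acc := by
  induction l with
  | nil => intro acc; rfl
  | cons p rest ih =>
    intro acc
    obtain ⟨a, b⟩ := p
    by_cases hab : a = b
    · subst hab
      simp only [uniteLoopA, ne_eq, not_true_eq_false, if_false, List.flatMap_cons,
        List.cons_append, List.nil_append, List.foldl_cons, ih]
      congr 1
      by_cases h : a ∈ acc <;> simp [h]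
    · simp only [uniteLoopA, ne_eq, hab, not_false_eq_true, if_true, List.flatMap_cons,
        List.cons_append, List.nil_append, List.foldl_cons, ih]

-- B's first pass builds exactly the flatMap list
theorem interleave_eq_flatMap (l : List (String × String)) :
    l.foldl (fun acc p => acc ++ [p.1, p.2]) [] = l.flatMap fun p => [p.1, p.2] := by
  have h : ∀ (l : List (String × String)) (acc : List String),
      l.foldl (fun acc p => acc ++ [p.1, p.2]) acc = acc ++ l.flatMap fun p => [p.1, p.2] := by
    intro l
    induction l with
    | nil => simp
    | cons p rest ih => intro acc; simp [ih]
  simpa using h l []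

-- the two slices of the same list coincide
theorem slice_min_eq_take5 (r : List String) :
    PySem.List.slice r (some 0) (some (min (r.length : Int) 5))
      = PySem.List.slice r none (some 5) := by
  have h5 : (0 : Int) ≤ min (r.length : Int) 5 := by positivity
  rw [PySem.List.slice_zero_start, PySem.List.slice_to _ h5, PySem.List.slice_to _ (by norm_num)]
  have : (min (r.length : Int) 5).toNat = min r.length 5 := by omega
  rw [this]
  rcases le_total r.length 5 with h | h
  · simp [Nat.min_eq_left h, List.take_of_length_le h]
  · simp [Nat.min_eq_right h]

-- ===== VERDICT (by name: the statement is the Claim_ definition above) =====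
theorem unite_articles_spec : Claim_equal_unite_articles := by
  intro tf bm _
  unfold Spec_unite_articles unite_articles unite_articles_alt
  rw [uniteLoopA_eq_dedup, interleave_eq_flatMap, slice_min_eq_take5]
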